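-- pv_equiv track=rewrite | github.com/SanjuHannah/Social-Robots-for-Helping-Children | qt_storytelling/qt_storytelling/scripts/qt_voice_story_orchestrator.py | choose_default_emotion_and_gesture
-- ===== SOURCE A (Python) =====
-- def choose_default_emotion_and_gesture(text, step_idx):
--     """
--     Choose an emotion (face) and gesture (body) using only what this QT supports.
--     This is used when the LLM does not specify emotion/gesture.
--     """
--     text_l = (text or "").lower()
--
--     # ---- Emotion (face) ----
--     if any(w in text_l for w in ["sad", "cry", "lonely", "upset", "afraid", "scared"]):
--         emotion = "QT/sad"
--     elif any(w in text_l for w in ["angry", "mad"]):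
--         emotion = "QT/angry"
--     else:
--         # default to happy for kids' stories and chat
--         emotion = "QT/happy"
--
--     # ---- Gesture (body) ----
--     if any(w in text_l for w in ["hello", "hi", "meet", "start", "begin"]):
--         gesture = "QT/hi"
--     elif any(w in text_l for w in ["clap", "yay", "hurray", "hooray", "great", "well done"]):
--         gesture = "QT/clapping"
--     elif any(w in text_l for w in ["shy", "quiet", "soft"]):
--         gesture = "QT/shy"
--     elif any(w in text_l for w in ["surprise", "suddenly", "wow"]):
--         gesture = "QT/hands-side-back"
--     elif "goodbye" in text_l or "home" in text_l or "end" in text_l: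
--         gesture = "QT/bye-bye"
--     else:
--         # cycle through all the known gestures so it doesn't repeat the same one
--         gesture = STORY_GESTURES[step_idx % len(STORY_GESTURES)]
--
--     return emotion, gesture
--
-- STORY_GESTURES = [
--     "QT/hi",               # greeting / start
--     "QT/clapping",         # excited / happy
--     "QT/hands-on-hip",     # confident / explaining
--     "QT/shy",              # quieter moments
--     "QT/hands-side-back",  # plot twists
--     "QT/happy",            # playful motions
--     "QT/sad",              # slower / sad moments
--     "QT/bye-bye",          # story ending
--     "QT/show_left",        # showing something to the side
--     "QT/sneezing",         # funny moment
--     "QT/send_kiss",        # affectionate / comforting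
--     "QT/peekaboo-back",    # playful
--     "QT/touch-head",       # thinking / worried
--     "QT/touch-head-back",  # variation
--     "QT/stretching",       # relaxed / waking up
--     "QT/up_left",          # reaching up
--     "QT/swipe_left",       # moving attention / scene change
--     "QT/bored",            # low energy part of story
-- ]
-- ===== SOURCE B (Python) =====
-- STORY_GESTURES = [
--     "QT/hi", "QT/clapping", "QT/hands-on-hip", "QT/shy",
--     "QT/hands-side-back", "QT/happy", "QT/sad", "QT/bye-bye",
--     "QT/show_left", "QT/sneezing", "QT/send_kiss", "QT/peekaboo-back",
--     "QT/touch-head", "QT/touch-head-back", "QT/stretching", "QT/up_left",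
--     "QT/swipe_left", "QT/bored",
-- ]
--
-- # Every keyword the chooser reacts to, flattened into one multi-pattern scan table.
-- _KEYWORDS = (
--     "sad", "cry", "lonely", "upset", "afraid", "scared", "angry", "mad",
--     "hello", "hi", "meet", "start", "begin",
--     "clap", "yay", "hurray", "hooray", "great", "well done",
--     "shy", "quiet", "soft",
--     "surprise", "suddenly", "wow",
--     "goodbye", "home", "end",
-- )
--
--
-- def choose_default_emotion_and_gesture(text, step_idx):
--     text_l = (text or "").lower()
--     # Single left-to-right sweep over the text: at each position, record which
--     # keywords start there.  After the sweep, 'found' holds every keyword that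
--     # occurs anywhere, so each decision below is a set lookup, not a text scan.
--     found = set()
--     for i in range(len(text_l) + 1):
--         for kw in _KEYWORDS:
--             if text_l.startswith(kw, i):
--                 found.add(kw)
--
--     if any(k in found for k in ("sad", "cry", "lonely", "upset", "afraid", "scared")):
--         emotion = "QT/sad"
--     elif any(k in found for k in ("angry", "mad")):
--         emotion = "QT/angry"
--     else:
--         emotion = "QT/happy"
--
--     if any(k in found for k in ("hello", "hi", "meet", "start", "begin")):
--         gesture = "QT/hi"
--     elif any(k in found for k in ("clap", "yay", "hurray", "hooray", "great", "well done")):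
--         gesture = "QT/clapping"
--     elif any(k in found for k in ("shy", "quiet", "soft")):
--         gesture = "QT/shy"
--     elif any(k in found for k in ("surprise", "suddenly", "wow")):
--         gesture = "QT/hands-side-back"
--     elif any(k in found for k in ("goodbye", "home", "end")):
--         gesture = "QT/bye-bye"
--     else:
--         gesture = STORY_GESTURES[step_idx % len(STORY_GESTURES)]
--
--     return emotion, gesture
-- ===== Notes on version B (the rewrite author's own statement) =====
-- stated objective: alternative
-- what changed: Instead of A's 27 independent substring searches inside an if/elif chain, B makes one left-to-right sweep over the lowered text collecting the set of keywords that start at each position, then decides emotion and gesture by set lookups in the same priority order.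
import Mathlib
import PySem

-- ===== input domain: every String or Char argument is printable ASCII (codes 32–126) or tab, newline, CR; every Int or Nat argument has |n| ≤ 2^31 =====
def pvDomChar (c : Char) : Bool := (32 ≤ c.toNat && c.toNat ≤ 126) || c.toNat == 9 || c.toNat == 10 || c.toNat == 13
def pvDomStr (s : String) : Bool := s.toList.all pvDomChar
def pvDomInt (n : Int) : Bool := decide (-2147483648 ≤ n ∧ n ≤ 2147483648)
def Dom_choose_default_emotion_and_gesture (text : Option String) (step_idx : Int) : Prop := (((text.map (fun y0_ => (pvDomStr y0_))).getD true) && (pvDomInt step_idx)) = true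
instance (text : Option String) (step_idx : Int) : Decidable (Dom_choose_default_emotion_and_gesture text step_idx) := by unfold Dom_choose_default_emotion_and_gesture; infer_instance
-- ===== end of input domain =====

-- B replaces A's 27 independent substring searches by ONE left-to-right sweep of the
-- text collecting the set of keywords that occur, followed by set lookups (alternative algorithm).

-- ===== PORT A =====
def pvStoryGestures : List String :=
  ["QT/hi", "QT/clapping", "QT/hands-on-hip", "QT/shy",
   "QT/hands-side-back", "QT/happy", "QT/sad", "QT/bye-bye",
   "QT/show_left", "QT/sneezing", "QT/send_kiss", "QT/peekaboo-back",
   "QT/touch-head", "QT/touch-head-back", "QT/stretching", "QT/up_left",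
   "QT/swipe_left", "QT/bored"]

def choose_default_emotion_and_gesture (text : Option String) (step_idx : Int) : String × String :=
  let text_l := PySem.Str.lower (text.getD "")
  let emotion :=
    if (["sad", "cry", "lonely", "upset", "afraid", "scared"] : List String).any (fun w => PySem.Str.isIn w text_l) then "QT/sad"
    else if (["angry", "mad"] : List String).any (fun w => PySem.Str.isIn w text_l) then "QT/angry"
    else "QT/happy"
  let gesture :=
    if (["hello", "hi", "meet", "start", "begin"] : List String).any (fun w => PySem.Str.isIn w text_l) then "QT/hi"
    else if (["clap", "yay", "hurray", "hooray", "great", "well done"] : List String).any (fun w => PySem.Str.isIn w text_l) then "QT/clapping"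
    else if (["shy", "quiet", "soft"] : List String).any (fun w => PySem.Str.isIn w text_l) then "QT/shy"
    else if (["surprise", "suddenly", "wow"] : List String).any (fun w => PySem.Str.isIn w text_l) then "QT/hands-side-back"
    else if PySem.Str.isIn "goodbye" text_l || PySem.Str.isIn "home" text_l || PySem.Str.isIn "end" text_l then "QT/bye-bye"
    else (PySem.List.pyGet? pvStoryGestures (PySem.Int.mod step_idx (pvStoryGestures.length : Int))).getD ""
  (emotion, gesture)

-- ===== PORT B =====
def pvAllKeywords : List String :=
  ["sad", "cry", "lonely", "upset", "afraid", "scared", "angry", "mad",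
   "hello", "hi", "meet", "start", "begin",
   "clap", "yay", "hurray", "hooray", "great", "well done",
   "shy", "quiet", "soft",
   "surprise", "suddenly", "wow",
   "goodbye", "home", "end"]

-- the single sweep of Source B: for i in range(len+1): for kw in _KEYWORDS: if text_l.startswith(kw, i): found.add(kw)
-- (text_l.startswith(kw, i) for 0 ≤ i ≤ len is exactly Chars.startswith (chars.drop i) kw.toList)
def pvFound (chars : List Char) : PySem.Set String :=
  (List.range (chars.length + 1)).foldl
    (fun s i => pvAllKeywords.foldl
      (fun s kw => if PySem.Chars.startswith (chars.drop i) kw.toList then PySem.Set.add s kw else s) s)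
    PySem.Set.empty

def choose_default_emotion_and_gesture_alt (text : Option String) (step_idx : Int) : String × String :=
  let text_l := PySem.Str.lower (text.getD "")
  let found := pvFound text_l.toList
  let emotion :=
    if (["sad", "cry", "lonely", "upset", "afraid", "scared"] : List String).any (fun k => PySem.Set.contains found k) then "QT/sad"
    else if (["angry", "mad"] : List String).any (fun k => PySem.Set.contains found k) then "QT/angry"
    else "QT/happy"
  let gesture :=
    if (["hello", "hi", "meet", "start", "begin"] : List String).any (fun k => PySem.Set.contains found k) then "QT/hi"
    else if (["clap", "yay", "hurray", "hooray", "great", "well done"] : List String).any (fun k => PySem.Set.contains found k) then "QT/clapping"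
    else if (["shy", "quiet", "soft"] : List String).any (fun k => PySem.Set.contains found k) then "QT/shy"
    else if (["surprise", "suddenly", "wow"] : List String).any (fun k => PySem.Set.contains found k) then "QT/hands-side-back"
    else if (["goodbye", "home", "end"] : List String).any (fun k => PySem.Set.contains found k) then "QT/bye-bye"
    else (PySem.List.pyGet? pvStoryGestures (PySem.Int.mod step_idx (pvStoryGestures.length : Int))).getD ""
  (emotion, gesture)

-- ===== PRECONDITION & SPEC =====
def Spec_choose_default_emotion_and_gesture (text : Option String) (step_idx : Int) (out : String × String) : Prop := out = choose_default_emotion_and_gesture_alt text step_idx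
instance (text : Option String) (step_idx : Int) (out : String × String) : Decidable (Spec_choose_default_emotion_and_gesture text step_idx out) := by unfold Spec_choose_default_emotion_and_gesture; infer_instance

-- ===== CLAIM (what is proved, stated in full; the proofs are below) =====
def Claim_equal_choose_default_emotion_and_gesture : Prop := ∀ (text : Option String) (step_idx : Int), Dom_choose_default_emotion_and_gesture text step_idx → Spec_choose_default_emotion_and_gesture text step_idx (choose_default_emotion_and_gesture text step_idx)

-- ===== LEMMAS AND PROOFS =====

-- membership in the inner fold over the keyword table
lemma mem_inner_fold (L : List String) (p : String → Bool) (s0 : PySem.Set String) (x : String) :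
    x ∈ L.foldl (fun s kw => if p kw then PySem.Set.add s kw else s) s0 ↔
      x ∈ s0 ∨ (x ∈ L ∧ p x = true) := by
  induction L generalizing s0 with
  | nil => simp
  | cons kw rest ih =>
      simp only [List.foldl_cons, List.mem_cons]
      by_cases hp : p kw
      · rw [if_pos hp, ih]
        simp only [PySem.Set.mem_add]
        constructor
        · rintro ((h | rfl) | ⟨h1, h2⟩)
          · exact Or.inl h
          · exact Or.inr ⟨Or.inl rfl, hp⟩
          · exact Or.inr ⟨Or.inr h1, h2⟩
        · rintro (h | ⟨rfl | h1, h2⟩)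
          · exact Or.inl (Or.inl h)
          · exact Or.inl (Or.inr rfl)
          · exact Or.inr ⟨h1, h2⟩
      · rw [if_neg hp, ih]
        constructor
        · rintro (h | ⟨h1, h2⟩)
          · exact Or.inl h
          · exact Or.inr ⟨Or.inr h1, h2⟩
        · rintro (h | ⟨rfl | h1, h2⟩)
          · exact Or.inl h
          · exact absurd h2 hp
          · exact Or.inr ⟨h1, h2⟩

-- membership in the outer fold over the positions
lemma mem_outer_fold (chars : List Char) (l : List Nat) (s0 : PySem.Set String) (x : String) :
    x ∈ l.foldl
        (fun s i => pvAllKeywords.foldl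
          (fun s kw => if PySem.Chars.startswith (chars.drop i) kw.toList then PySem.Set.add s kw else s) s)
        s0 ↔
      x ∈ s0 ∨ (x ∈ pvAllKeywords ∧ ∃ i ∈ l, PySem.Chars.startswith (chars.drop i) x.toList = true) := by
  induction l generalizing s0 with
  | nil => simp
  | cons i rest ih =>
      simp only [List.foldl_cons, ih, mem_inner_fold]
      constructor
      · rintro ((h | ⟨h1, h2⟩) | ⟨h1, j, hj, h2⟩)
        · exact Or.inl h
        · exact Or.inr ⟨h1, i, List.mem_cons_self .., h2⟩
        · exact Or.inr ⟨h1, j, List.mem_cons_of_mem _ hj, h2⟩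
      · rintro (h | ⟨h1, j, hj, h2⟩)
        · exact Or.inl (Or.inl h)
        · rcases List.mem_cons.mp hj with rfl | hj
          · exact Or.inl (Or.inr ⟨h1, h2⟩)
          · exact Or.inr ⟨h1, j, hj, h2⟩

-- the sweep finds exactly the keywords occurring in the text
lemma contains_pvFound (chars : List Char) (kw : String) (hkw : kw ∈ pvAllKeywords) :
    PySem.Set.contains (pvFound chars) kw = PySem.Chars.isIn kw.toList chars := by
  have hmem : kw ∈ pvFound chars ↔ PySem.Chars.isIn kw.toList chars = true := by
    rw [pvFound, mem_outer_fold]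
    simp only [PySem.Set.empty, List.not_mem_nil, false_or, List.mem_range]
    rw [← PySem.Chars.exists_prefix_drop_iff_isIn]
    constructor
    · rintro ⟨_, i, _, h⟩
      exact ⟨i, (PySem.Chars.startswith_iff _ _).mp h⟩
    · rintro ⟨j, hj⟩
      refine ⟨hkw, min j chars.length, by omega, (PySem.Chars.startswith_iff _ _).mpr ?_⟩
      rcases le_or_gt j chars.length with h | h
      · simpa [min_eq_left h] using hj
      · have h1 : chars.drop j = [] := List.drop_eq_nil_of_le (by omega)
        have h2 : chars.drop (min j chars.length) = [] := List.drop_eq_nil_of_le (by omega)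
        rw [h2]; rw [h1] at hj; exact hj
  cases h : PySem.Chars.isIn kw.toList chars with
  | true => exact (PySem.Set.contains_iff _ _).mpr (hmem.mpr h)
  | false =>
      by_contra hc
      have hct : PySem.Set.contains (pvFound chars) kw = true := by
        cases h' : PySem.Set.contains (pvFound chars) kw
        · exact absurd h' hc
        · rfl
      have := hmem.mp ((PySem.Set.contains_iff _ _).mp hct)
      rw [h] at this; exact Bool.false_ne_true this

-- ===== VERDICT (by name: the statement is the Claim_ definition above) =====
theorem choose_default_emotion_and_gesture_spec : Claim_equal_choose_default_emotion_and_gesture := by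
  intro text step_idx _
  unfold Spec_choose_default_emotion_and_gesture
  unfold choose_default_emotion_and_gesture choose_default_emotion_and_gesture_alt
  have hc := fun kw h => contains_pvFound (PySem.Str.lower (text.getD "")).toList kw h
  simp only [List.any_cons, List.any_nil, Bool.or_false]
  rw [hc "sad" (by decide), hc "cry" (by decide), hc "lonely" (by decide), hc "upset" (by decide),
      hc "afraid" (by decide), hc "scared" (by decide), hc "angry" (by decide), hc "mad" (by decide),
      hc "hello" (by decide), hc "hi" (by decide), hc "meet" (by decide), hc "start" (by decide),
      hc "begin" (by decide), hc "clap" (by decide), hc "yay" (by decide), hc "hurray" (by decide),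
      hc "hooray" (by decide), hc "great" (by decide), hc "well done" (by decide),
      hc "shy" (by decide), hc "quiet" (by decide), hc "soft" (by decide),
      hc "surprise" (by decide), hc "suddenly" (by decide), hc "wow" (by decide),
      hc "goodbye" (by decide), hc "home" (by decide), hc "end" (by decide)]
  simp [PySem.Str.isIn_eq, or_assoc]
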